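-- pv_equiv track=rewrite | github.com/MishaMalinov/cloud-parser | recursive_crawler.py | escape_xpath_literal
-- ===== SOURCE A (Python) =====
-- def escape_xpath_literal(s: str) -> str:
--     if "'" not in s:
--         return f"'{s}'"
--     if '"' not in s:
--         return f'"{s}"'
--     parts = []
--     for part in s.split("'"):
--         parts.append(f"'{part}'")
--         parts.append('"\'"')
--     parts = parts[:-1]
--     return "concat(" + ", ".join(parts) + ")"
-- ===== SOURCE B (Python) =====
-- def escape_xpath_literal(s: str) -> str:
--     if "'" not in s:
--         return f"'{s}'"
--     if '"' not in s:
--         return f'"{s}"'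
--     out = ["concat("]
--     while True:
--         i = s.find("'")
--         if i < 0:
--             out.append(f"'{s}'")
--             break
--         out.append(f"'{s[:i]}', \"'\", ")
--         s = s[i + 1:]
--     return "".join(out) + ")"
-- ===== Notes on version B (the rewrite author's own statement) =====
-- stated objective: alternative
-- what changed: The both-quotes case no longer splits the string and joins a trimmed interleaved parts list: B runs a single peel loop that finds the next apostrophe, appends the quoted chunk together with its boundary token to an output accumulator, and truncates the string, producing the identical concat() expression with no split list and no trim.
import Mathlib
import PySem

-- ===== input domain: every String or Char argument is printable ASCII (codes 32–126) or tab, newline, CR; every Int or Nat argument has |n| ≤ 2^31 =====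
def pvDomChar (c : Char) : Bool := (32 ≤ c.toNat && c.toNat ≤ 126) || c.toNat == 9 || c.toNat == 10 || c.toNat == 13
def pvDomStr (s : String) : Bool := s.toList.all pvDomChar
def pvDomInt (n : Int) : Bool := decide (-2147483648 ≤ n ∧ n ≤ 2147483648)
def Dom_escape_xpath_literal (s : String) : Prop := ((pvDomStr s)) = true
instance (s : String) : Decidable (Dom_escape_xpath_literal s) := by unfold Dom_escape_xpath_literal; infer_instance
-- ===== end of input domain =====

-- B replaces A's split/interleave/trim list construction by a peel loop that finds each
-- apostrophe and appends the quoted chunk plus boundary directly; objective: alternative.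

-- ===== PORT A =====
def escape_xpath_literal (s : String) : String :=
  if PySem.Str.isIn "'" s = false then
    String.ofList ('\'' :: s.toList ++ ['\''])
  else if PySem.Str.isIn "\"" s = false then
    String.ofList ('"' :: s.toList ++ ['"'])
  else
    let parts := (PySem.Chars.splitOn s.toList ['\'']).foldl
      (fun acc part => acc ++ [('\'' :: part ++ ['\'']), "\"'\"".toList]) []
    let parts := PySem.List.slice parts none (some (-1))
    String.ofList ("concat(".toList ++ PySem.Chars.join ", ".toList parts ++ ")".toList)

-- ===== PORT B =====
-- helper for the B port's termination: a found apostrophe means the list is nonempty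
theorem pv_find_nonneg_ne_nil (l : List Char) (h : ¬ PySem.Chars.find l ['\''] < 0) : 1 ≤ l.length := by
  have hne : PySem.Chars.find l ['\''] ≠ -1 := by omega
  have hinf : ['\''] <:+: l := (PySem.Chars.find_ne_neg_one_iff l ['\'']).mp hne
  simpa using hinf.length_le

-- port of B's while loop: i = s.find("'"); i < 0 → append final chunk and stop;
-- else append f"'{s[:i]}', \"'\", " and continue with s = s[i+1:]
def xpath_loop (s : List Char) (out : List (List Char)) : List (List Char) :=
  let i := PySem.Chars.find s ['\'']
  if _h : i < 0 then out ++ [('\'' :: s ++ ['\''])]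
  else xpath_loop (PySem.List.slice s (some (i + 1)) none)
         (out ++ [('\'' :: PySem.List.slice s none (some i)) ++ "', \"'\", ".toList])
termination_by s.length
decreasing_by
  have h0 : ¬ PySem.Chars.find s ['\''] < 0 := _h
  rw [PySem.List.slice_from (xs := s) (a := PySem.Chars.find s ['\''] + 1) (by omega)]
  have h1 := pv_find_nonneg_ne_nil s h0
  simp only [List.length_drop]
  omega

def escape_xpath_literal_alt (s : String) : String :=
  if PySem.Str.isIn "'" s = false then
    String.ofList ('\'' :: s.toList ++ ['\''])
  else if PySem.Str.isIn "\"" s = false then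
    String.ofList ('"' :: s.toList ++ ['"'])
  else
    String.ofList (PySem.Chars.join [] (xpath_loop s.toList ["concat(".toList]) ++ ")".toList)

-- ===== PRECONDITION & SPEC =====
def Spec_escape_xpath_literal (s : String) (out : String) : Prop := out = escape_xpath_literal_alt s
instance (s : String) (out : String) : Decidable (Spec_escape_xpath_literal s out) := by unfold Spec_escape_xpath_literal; infer_instance

-- ===== CLAIM (what is proved, stated in full; the proofs are below) =====
def Claim_equal_escape_xpath_literal : Prop := ∀ (s : String), Dom_escape_xpath_literal s → Spec_escape_xpath_literal s (escape_xpath_literal s)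

-- ===== LEMMAS AND PROOFS =====

-- reference single-quote split (sep = ['\''])
def mySplit : List Char → List (List Char)
  | [] => [[]]
  | c :: t => if c = '\'' then [] :: mySplit t else (mySplit t).modifyHead (c :: ·)

theorem mySplit_ne_nil (l : List Char) : mySplit l ≠ [] := by
  induction l with
  | nil => simp [mySplit]
  | cons c t ih =>
    simp only [mySplit]
    split
    · simp
    · cases h : mySplit t with
      | nil => exact absurd h ih
      | cons p ps => simp [List.modifyHead]

def headPre (pre : List Char) : List (List Char) → List (List Char)
  | [] => [pre]
  | p :: ps => (pre ++ p) :: ps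

theorem go_split (fuel : Nat) : ∀ (l cur : List Char) (acc : List (List Char)),
    l.length ≤ fuel →
    PySem.Chars.splitOn.go ['\''] fuel l cur acc = acc.reverse ++ headPre cur.reverse (mySplit l) := by
  induction fuel with
  | zero =>
    intro l cur acc h
    have hl : l = [] := by cases l with | nil => rfl | cons a b => simp at h
    subst hl
    rw [PySem.Chars.splitOn.go.eq_def]
    simp [mySplit, headPre]
  | succ n ih =>
    intro l cur acc h
    cases l with
    | nil =>
      rw [PySem.Chars.splitOn.go.eq_def]
      simp [mySplit, headPre]
    | cons c rest =>
      rw [PySem.Chars.splitOn.go.eq_def]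
      simp only []
      by_cases hc : c = '\''
      · subst hc
        have hp : List.isPrefixOf ['\''] ('\'' :: rest) = true := by
          simp [List.isPrefixOf]
        rw [if_pos hp]
        simp only [List.length_singleton, List.drop_succ_cons, List.drop_zero]
        rw [ih rest [] (cur.reverse :: acc) (by simpa using Nat.le_of_succ_le_succ h)]
        simp only [mySplit]
        rcases hsp : mySplit rest with _ | ⟨p, ps⟩
        · exact absurd hsp (mySplit_ne_nil rest)
        · simp [headPre]
      · have hp : List.isPrefixOf ['\''] (c :: rest) = false := by
          simp [List.isPrefixOf]
          intro hq; exact absurd hq.symm hc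
        rw [if_neg (by simp [hp])]
        rw [ih rest (c :: cur) acc (by simpa using Nat.le_of_succ_le_succ h)]
        simp only [mySplit, if_neg hc]
        rcases hsp : mySplit rest with _ | ⟨p, ps⟩
        · exact absurd hsp (mySplit_ne_nil rest)
        · simp [headPre, List.modifyHead]

theorem splitOn_eq_mySplit (s : List Char) :
    PySem.Chars.splitOn s ['\''] = mySplit s := by
  show PySem.Chars.splitOn.go ['\''] (s.length + 1) s [] [] = mySplit s
  rw [go_split (s.length + 1) s [] [] (by omega)]
  rcases hsp : mySplit s with _ | ⟨p, ps⟩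
  · exact absurd hsp (mySplit_ne_nil s)
  · simp [headPre]

-- equations for Chars.find with the one-character needle ['\'']
theorem go_q_cons (c : Char) (t : List Char) (k : Nat) :
    PySem.Chars.find.go ['\''] (c :: t) k =
      if c = '\'' then (k : Int) else PySem.Chars.find.go ['\''] t (k + 1) := by
  rw [PySem.Chars.find.go.eq_def]
  simp only [List.isPrefixOf, Bool.and_true, beq_iff_eq]
  by_cases hc : c = '\''
  · simp [hc]
  · rw [if_neg (by exact fun h => hc h.symm), if_neg hc]

theorem go_q_shift (t : List Char) : ∀ (k : Nat),
    PySem.Chars.find.go ['\''] t k =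
      if PySem.Chars.find t ['\''] = -1 then -1
      else PySem.Chars.find t ['\''] + k := by
  induction t with
  | nil =>
    intro k
    rw [PySem.Chars.find.go.eq_def]
    simp [PySem.Chars.find]
    rw [PySem.Chars.find.go.eq_def]
    simp
  | cons c t ih =>
    intro k
    by_cases hc : c = '\''
    · have hf : PySem.Chars.find (c :: t) ['\''] = 0 := by
        show PySem.Chars.find.go ['\''] (c :: t) 0 = 0
        rw [go_q_cons]; simp [hc]
      rw [go_q_cons, if_pos hc, hf]
      simp
    · have hf : PySem.Chars.find (c :: t) ['\''] =
          if PySem.Chars.find t ['\''] = -1 then -1 else PySem.Chars.find t ['\''] + 1 := by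
        show PySem.Chars.find.go ['\''] (c :: t) 0 = _
        rw [go_q_cons, if_neg hc, ih 1]; simp
      rw [go_q_cons, if_neg hc, ih (k+1), hf]
      by_cases h : PySem.Chars.find t ['\''] = -1
      · simp [h]
      · have h0 : (-1:Int) ≤ PySem.Chars.find t ['\''] := PySem.Chars.neg_one_le_find t ['\'']
        simp only [if_neg h]
        rw [if_neg (by omega)]
        push_cast; ring

theorem find_q_cons (c : Char) (t : List Char) :
    PySem.Chars.find (c :: t) ['\''] =
      if c = '\'' then 0
      else if PySem.Chars.find t ['\''] = -1 then -1 else PySem.Chars.find t ['\''] + 1 := by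
  show PySem.Chars.find.go ['\''] (c :: t) 0 = _
  rw [go_q_cons, go_q_shift]
  by_cases hc : c = '\'' <;> simp [hc]

-- mySplit characterised by the first apostrophe
theorem mySplit_no (l : List Char) (h : PySem.Chars.find l ['\''] = -1) : mySplit l = [l] := by
  induction l with
  | nil => simp [mySplit]
  | cons c t ih =>
    rw [find_q_cons] at h
    by_cases hc : c = '\''
    · rw [if_pos hc] at h; exact absurd h (by norm_num)
    · rw [if_neg hc] at h
      by_cases h2 : PySem.Chars.find t ['\''] = -1
      · simp [mySplit, if_neg hc, ih h2, List.modifyHead]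
      · rw [if_neg h2] at h
        have h0 : (-1:Int) ≤ PySem.Chars.find t ['\''] := PySem.Chars.neg_one_le_find t ['\'']
        omega

theorem split_first (l : List Char) : ∀ (i : Nat), PySem.Chars.find l ['\''] = (i : Int) →
    mySplit l = l.take i :: mySplit (l.drop (i + 1)) := by
  induction l with
  | nil =>
    intro i h
    have : PySem.Chars.find ([] : List Char) ['\''] = -1 := by decide
    rw [this] at h; omega
  | cons c t ih =>
    intro i h
    rw [find_q_cons] at h
    by_cases hc : c = '\''
    · rw [if_pos hc] at h
      have hi : i = 0 := by omega
      subst hi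
      simp [mySplit, hc]
    · rw [if_neg hc] at h
      by_cases h2 : PySem.Chars.find t ['\''] = -1
      · rw [if_pos h2] at h; omega
      · rw [if_neg h2] at h
        have h0 : (-1:Int) ≤ PySem.Chars.find t ['\''] := PySem.Chars.neg_one_le_find t ['\'']
        have hi : 1 ≤ i := by omega
        have ht : PySem.Chars.find t ['\''] = ((i - 1 : Nat) : Int) := by
          push_cast [hi]; omega
        rw [mySplit, if_neg hc, ih (i-1) ht]
        have htk : (c :: t).take i = c :: t.take (i-1) := by
          cases i with
          | zero => omega
          | succ n => simp
        have hdr : (c :: t).drop (i+1) = t.drop ((i-1)+1) := by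
          cases i with
          | zero => omega
          | succ n => simp
        rw [htk, hdr]
        simp [List.modifyHead]

-- the per-piece expansion A builds, and its joined form
def wrapQ (p : List Char) : List Char := '\'' :: p ++ ['\'']

def gJoin : List (List Char) → List Char
  | [] => []
  | [p] => wrapQ p
  | p :: ps => wrapQ p ++ ", \"'\", ".toList ++ gJoin ps

theorem join_dropLast_flatMap (ps : List (List Char)) :
    PySem.Chars.join ", ".toList ((ps.flatMap (fun p => [wrapQ p, "\"'\"".toList])).dropLast)
      = gJoin ps := by
  induction ps with
  | nil => simp [gJoin, PySem.Chars.join_nil]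
  | cons p ps ih =>
    cases ps with
    | nil => simp [gJoin, List.flatMap, PySem.Chars.join_singleton]
    | cons p2 ps2 =>
      have hF : (p :: p2 :: ps2).flatMap (fun p => [wrapQ p, "\"'\"".toList])
          = wrapQ p :: "\"'\"".toList :: wrapQ p2 :: "\"'\"".toList :: ps2.flatMap (fun p => [wrapQ p, "\"'\"".toList]) := by
        simp [List.flatMap]
      have hF2 : (p2 :: ps2).flatMap (fun p => [wrapQ p, "\"'\"".toList])
          = wrapQ p2 :: "\"'\"".toList :: ps2.flatMap (fun p => [wrapQ p, "\"'\"".toList]) := by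
        simp [List.flatMap]
      rw [hF, List.dropLast_cons₂, List.dropLast_cons₂, List.dropLast_cons₂,
          PySem.Chars.join_cons_cons, PySem.Chars.join_cons_cons]
      rw [← List.dropLast_cons₂, ← hF2, ih]
      show _ = wrapQ p ++ ", \"'\", ".toList ++ gJoin (p2 :: ps2)
      simp [List.append_assoc]

-- proof-side reference: the segments the loop appends, as a plain recursion
def pvPiecesRec (l : List Char) : List Char :=
  let i := PySem.Chars.find l ['\'']
  if _h : i < 0 then '\'' :: l ++ ['\'']
  else ('\'' :: PySem.List.slice l none (some i)) ++ "', \"'\", ".toList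
        ++ pvPiecesRec (PySem.List.slice l (some (i + 1)) none)
termination_by l.length
decreasing_by
  have h0 : ¬ PySem.Chars.find l ['\''] < 0 := _h
  rw [PySem.List.slice_from (xs := l) (a := PySem.Chars.find l ['\''] + 1) (by omega)]
  have h1 := pv_find_nonneg_ne_nil l h0
  simp only [List.length_drop]
  omega

-- the reference recursion computes gJoin of the split
theorem pieces_eq (l : List Char) : pvPiecesRec l = gJoin (mySplit l) := by
  generalize hn : l.length = n
  induction n using Nat.strong_induction_on generalizing l with
  | _ n ih =>
    rw [pvPiecesRec.eq_def]
    by_cases hneg : PySem.Chars.find l ['\''] < 0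
    · have h1 : PySem.Chars.find l ['\''] = -1 := by
        have := PySem.Chars.neg_one_le_find l ['\'']
        omega
      rw [dif_pos hneg, mySplit_no l h1]
      rfl
    · have h0 : (0:Int) ≤ PySem.Chars.find l ['\''] := by omega
      obtain ⟨j, hj⟩ : ∃ j : Nat, PySem.Chars.find l ['\''] = (j : Int) :=
        ⟨(PySem.Chars.find l ['\'']).toNat, by omega⟩
      have hlen : 1 ≤ l.length := pv_find_nonneg_ne_nil l hneg
      rw [dif_neg hneg, hj, PySem.List.slice_to_natCast]
      have hcast : (j : Int) + 1 = ((j + 1 : Nat) : Int) := by push_cast; ring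
      rw [hcast, PySem.List.slice_from_natCast]
      rw [ih (l.drop (j+1)).length (by simp [List.length_drop]; omega) (l.drop (j+1)) rfl]
      rw [split_first l j hj]
      rcases hsp : mySplit (l.drop (j+1)) with _ | ⟨p, ps⟩
      · exact absurd hsp (mySplit_ne_nil _)
      · rw [← hsp]
        show ('\'' :: l.take j) ++ "', \"'\", ".toList ++ gJoin (mySplit (l.drop (j+1)))
            = gJoin (l.take j :: mySplit (l.drop (j+1)))
        rw [hsp]
        show _ = wrapQ (l.take j) ++ ", \"'\", ".toList ++ gJoin (p :: ps)
        rw [← hsp]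
        simp [wrapQ]

theorem gJoin_mySplit_pieces (s : List Char) :
    gJoin (mySplit s) = pvPiecesRec s := (pieces_eq s).symm

theorem join_nil_flatten (ls : List (List Char)) :
    PySem.Chars.join [] ls = ls.flatten := by
  induction ls with
  | nil => simp [PySem.Chars.join_nil]
  | cons a ls ih =>
    cases ls with
    | nil => simp [PySem.Chars.join_singleton]
    | cons b ls2 => rw [PySem.Chars.join_cons_cons, ih]; simp

theorem loop_flatten (s : List Char) : ∀ (out : List (List Char)),
    (xpath_loop s out).flatten = out.flatten ++ pvPiecesRec s := by
  generalize hn : s.length = n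
  induction n using Nat.strong_induction_on generalizing s with
  | _ n ih =>
    intro out
    rw [xpath_loop.eq_def, pvPiecesRec.eq_def]
    by_cases hneg : PySem.Chars.find s ['\''] < 0
    · rw [dif_pos hneg, dif_pos hneg]
      simp
    · rw [dif_neg hneg, dif_neg hneg]
      have h0 : ¬ PySem.Chars.find s ['\''] < 0 := hneg
      have hlen := pv_find_nonneg_ne_nil s h0
      have hd : (PySem.List.slice s (some (PySem.Chars.find s ['\''] + 1)) none).length < n := by
        rw [PySem.List.slice_from (xs := s) (a := PySem.Chars.find s ['\''] + 1) (by omega)]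
        simp only [List.length_drop]
        omega
      rw [ih _ hd _ rfl]
      simp

theorem slice_dropLast {α : Type} (xs : List α) :
    PySem.List.slice xs none (some (-1)) = xs.dropLast := by
  simp [PySem.List.slice, List.dropLast_eq_take]

-- ===== VERDICT (by name: the statement is the Claim_ definition above) =====
theorem escape_xpath_literal_spec : Claim_equal_escape_xpath_literal := by
  intro s _
  show escape_xpath_literal s = escape_xpath_literal_alt s
  unfold escape_xpath_literal escape_xpath_literal_alt
  split_ifs with h1 h2
  · rfl
  · rfl
  · show String.ofList ("concat(".toList ++ PySem.Chars.join ", ".toList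
        (PySem.List.slice ((PySem.Chars.splitOn s.toList ['\'']).foldl
          (fun acc part => acc ++ [('\'' :: part ++ ['\'']), "\"'\"".toList]) []) none (some (-1))) ++ ")".toList) = _
    congr 1
    rw [PySem.List.foldl_append_eq_flatMap (fun p => [('\'' :: p ++ ['\'']), "\"'\"".toList])]
    rw [List.nil_append, slice_dropLast, splitOn_eq_mySplit]
    show "concat(".toList ++
        PySem.Chars.join ", ".toList ((mySplit s.toList).flatMap (fun p => [wrapQ p, "\"'\"".toList])).dropLast
        ++ ")".toList = _
    rw [join_dropLast_flatMap, gJoin_mySplit_pieces, join_nil_flatten, loop_flatten]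
    simp
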